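-- pv_equiv track=rewrite | github.com/jasonbrackman/aquaq_2023 | src/q_23.py | _in_dia
-- ===== SOURCE A (Python) =====
-- from typing import List
--
-- def _in_dia(gram: str, cypher: List[str]) -> str:
--     results = []
--     for c in list(gram):
--         for col in range(len(cypher[0])):
--             line = [c[col] for c in cypher]
--             if c in line:
--                 results.append((col, line.index(c)))
--
--     if len(results) == 2:
--         col1, row1 = results[0]
--         col2, row2 = results[1]
--
--         a = cypher[row1][col2]
--         b = cypher[row2][col1]
--         return a + b
--     return ""
-- ===== SOURCE B (Python) =====
-- from typing import List
--
-- def _in_dia(gram: str, cypher: List[str]) -> str: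
--     # One pass over the grid columns: index, per distinct char, its (col, first-row)
--     # occurrences; then each gram char is answered by a dictionary lookup.
--     index = {}
--     col = 0
--     for column in zip(*cypher):
--         seen = set()
--         row = 0
--         for ch in column:
--             if ch not in seen:
--                 seen.add(ch)
--                 index.setdefault(ch, []).append((col, row))
--             row += 1
--         col += 1
--     results = []
--     for c in gram:
--         results += index.get(c, [])
--     if len(results) == 2:
--         (col1, row1), (col2, row2) = results
--         return cypher[row1][col2] + cypher[row2][col1]
--     return ""
-- ===== Notes on version B (the rewrite author's own statement) =====
-- stated objective: faster
-- what changed: Instead of rescanning every grid column for every gram character, B makes one pass over the grid columns (via zip) building a char -> list of (col, first-row) index, then answers each gram character by a dictionary lookup.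
import Mathlib
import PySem

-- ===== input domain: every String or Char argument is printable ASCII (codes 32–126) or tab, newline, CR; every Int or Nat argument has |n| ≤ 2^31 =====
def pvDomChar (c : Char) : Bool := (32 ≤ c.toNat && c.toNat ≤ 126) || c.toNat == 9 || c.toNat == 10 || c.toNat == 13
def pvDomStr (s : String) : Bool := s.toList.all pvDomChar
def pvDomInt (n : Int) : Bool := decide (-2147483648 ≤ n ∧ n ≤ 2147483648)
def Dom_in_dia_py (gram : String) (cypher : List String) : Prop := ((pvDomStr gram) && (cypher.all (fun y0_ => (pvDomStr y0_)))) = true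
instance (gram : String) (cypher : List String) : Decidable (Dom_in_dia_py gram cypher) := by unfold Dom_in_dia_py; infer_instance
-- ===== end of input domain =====

-- B replaces A's per-gram-char rescan of every grid column by a single pass over the
-- grid columns building a char -> (col, first-row) index, then one lookup per gram char.


-- ===== PORT A =====
def in_dia_py (gram : String) (cypher : List String) : String :=
  let results : List (Int × Int) := gram.toList.foldl (fun acc c =>
    (PySem.List.pyRange 0 (PySem.Str.len (cypher.headD "")) 1).foldl (fun acc2 col =>
      let line : List Char := cypher.map (fun s => (PySem.Str.pyGet? s col).getD ' ')
      if c ∈ line then acc2 ++ [(col, ((PySem.List.index? line c).getD 0 : Int))] else acc2) acc) []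
  match results with
  | [(col1, row1), (col2, row2)] =>
      String.ofList [(PySem.Str.pyGet? ((PySem.List.pyGet? cypher row1).getD "") col2).getD ' ',
                     (PySem.Str.pyGet? ((PySem.List.pyGet? cypher row2).getD "") col1).getD ' ']
  | _ => ""

-- ===== PORT B =====
-- zip(*cypher): the list of columns, truncated to the shortest row (Python's zip rule)
def pvZipStar (rows : List String) : List (List Char) :=
  (List.range (((rows.map (fun s => s.toList.length)).min?).getD 0)).map
    (fun j => rows.map (fun s => s.toList.getD j ' '))

-- inner loop over one column's chars (`row` counter, `seen`, the dict `index`);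
-- Python's index.setdefault(ch, []).append((col, row)) is d.modify ch [] (· ++ [(col, row)])
def pvScanCol (col : Int) (chs : List Char) (row : Int) (seen : PySem.Set Char)
    (d : PySem.Dict Char (List (Int × Int))) : PySem.Dict Char (List (Int × Int)) :=
  match chs with
  | [] => d
  | ch :: rest =>
    if seen.contains ch then pvScanCol col rest (row + 1) seen d
    else pvScanCol col rest (row + 1) (seen.add ch) (d.modify ch [] (fun v => v ++ [(col, row)]))

-- the final unpack-and-cross step of B (same code as B's Python tail)
def pvAnswer (cypher : List String) (results : List (Int × Int)) : String :=
  if results.length = 2 then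
    let p := results.getD 0 (0, 0)
    let q := results.getD 1 (0, 0)
    String.ofList [(PySem.Str.pyGet? ((PySem.List.pyGet? cypher p.2).getD "") q.1).getD ' ',
                   (PySem.Str.pyGet? ((PySem.List.pyGet? cypher q.2).getD "") p.1).getD ' ']
  else ""

def in_dia_py_alt (gram : String) (cypher : List String) : String :=
  let index := ((pvZipStar cypher).foldl
    (fun (st : PySem.Dict Char (List (Int × Int)) × Int) column =>
      (pvScanCol st.2 column 0 PySem.Set.empty st.1, st.2 + 1))
    (PySem.Dict.empty, 0)).1
  let results : List (Int × Int) := gram.toList.foldl (fun acc c => acc ++ index.getD c []) []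
  pvAnswer cypher results

-- ===== PRECONDITION & SPEC =====
-- A raises IndexError iff gram is nonempty and the grid is empty or has a row shorter
-- than row 0; Pre_ excludes exactly those inputs.
def Pre_in_dia_py (gram : String) (cypher : List String) : Prop :=
  gram = "" ∨ (cypher ≠ [] ∧ ∀ s ∈ cypher, (cypher.headD "").toList.length ≤ s.toList.length)
instance (gram : String) (cypher : List String) : Decidable (Pre_in_dia_py gram cypher) := by
  unfold Pre_in_dia_py; infer_instance
def pvWitness_in_dia_py : String × List String := ("ab", ["ax", "yb"])

def Spec_in_dia_py (gram : String) (cypher : List String) (out : String) : Prop := out = in_dia_py_alt gram cypher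
instance (gram : String) (cypher : List String) (out : String) : Decidable (Spec_in_dia_py gram cypher out) := by unfold Spec_in_dia_py; infer_instance

-- ===== CLAIM (what is proved, stated in full; the proofs are below) =====
def Claim_equal_in_dia_py : Prop := ∀ (gram : String) (cypher : List String), Dom_in_dia_py gram cypher → Pre_in_dia_py gram cypher → Spec_in_dia_py gram cypher (in_dia_py gram cypher)

-- ===== LEMMAS AND PROOFS =====

-- A's contribution of one column for one gram char
def pvContrib (c : Char) (col : Int) (chs : List Char) : List (Int × Int) :=
  if c ∈ chs then [(col, ((PySem.List.index? chs c).getD 0 : Int))] else []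

-- B's flattened contributions of a list of columns starting at column number col0
def pvColsFlat (c : Char) (col0 : Int) : List (List Char) → List (Int × Int)
  | [] => []
  | chs :: rest => pvContrib c col0 chs ++ pvColsFlat c (col0 + 1) rest

theorem pv_idx_cons (c ch : Char) (rest : List Char) (hch : ch ≠ c) (hm : c ∈ rest) (row : Int) :
    row + 1 + ((PySem.List.index? rest c).getD 0 : Int)
      = row + ((PySem.List.index? (ch :: rest) c).getD 0 : Int) := by
  rw [PySem.List.index?_cons_of_ne rest hch]
  rcases ho : PySem.List.index? rest c with _ | k
  · rw [PySem.List.index?_eq_none_iff] at ho; exact absurd hm ho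
  · simp; ring

theorem pvScanCol_getD (c : Char) (col : Int) :
    ∀ (chs : List Char) (row : Int) (seen : PySem.Set Char)
      (d : PySem.Dict Char (List (Int × Int))),
      (pvScanCol col chs row seen d).getD c [] =
        d.getD c [] ++ (if c ∉ seen ∧ c ∈ chs
          then [(col, row + ((PySem.List.index? chs c).getD 0 : Int))] else []) := by
  intro chs
  induction chs with
  | nil => intro row seen d; simp [pvScanCol]
  | cons ch rest ih =>
    intro row seen d
    by_cases hs : ch ∈ seen
    · rw [show pvScanCol col (ch :: rest) row seen d
          = pvScanCol col rest (row + 1) seen d by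
            simp [pvScanCol, PySem.Set.contains, hs], ih]
      congr 1
      by_cases hch : ch = c
      · subst hch; simp [hs]
      · by_cases hm : c ∈ rest
        · simp only [hm, List.mem_cons, Ne.symm hch, false_or, and_true]
          rw [pv_idx_cons c ch rest hch hm row]
        · simp [hm, Ne.symm hch]
    · rw [show pvScanCol col (ch :: rest) row seen d
          = pvScanCol col rest (row + 1) (seen.add ch) (d.modify ch [] (fun v => v ++ [(col, row)]))
          by simp [pvScanCol, PySem.Set.contains, hs], ih]
      by_cases hch : ch = c
      · subst hch
        rw [PySem.Dict.getD_modify_self, PySem.List.index?_cons_self]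
        simp [hs]
      · rw [PySem.Dict.getD_modify_of_ne _ _ _ (Ne.symm hch)]
        have hadd : c ∈ seen.add ch ↔ c ∈ seen := by
          rw [PySem.Set.mem_add]; simp [Ne.symm hch]
        simp only [hadd]
        congr 1
        by_cases hm : c ∈ rest
        · simp only [hm, List.mem_cons, Ne.symm hch, false_or, and_true]
          rw [pv_idx_cons c ch rest hch hm row]
        · simp [hm, Ne.symm hch]

theorem pvFold_getD (c : Char) :
    ∀ (columns : List (List Char)) (d : PySem.Dict Char (List (Int × Int))) (col0 : Int),
      ((columns.foldl
        (fun (st : PySem.Dict Char (List (Int × Int)) × Int) column =>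
          (pvScanCol st.2 column 0 PySem.Set.empty st.1, st.2 + 1)) (d, col0)).1).getD c [] =
        d.getD c [] ++ pvColsFlat c col0 columns := by
  intro columns
  induction columns with
  | nil => intro d col0; simp [pvColsFlat]
  | cons chs rest ih =>
    intro d col0
    rw [List.foldl_cons, ih, pvColsFlat, pvScanCol_getD, ← List.append_assoc]
    congr 2
    simp [pvContrib, PySem.Set.empty]

theorem pvColsFlat_map_range (c : Char) :
    ∀ (n : Nat) (g : Nat → List Char) (col0 : Int),
      pvColsFlat c col0 ((List.range n).map g) =
        (List.range n).flatMap (fun (j : Nat) => pvContrib c (col0 + (j : Int)) (g j)) := by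
  intro n
  induction n with
  | zero => intro g col0; simp [pvColsFlat]
  | succ m ih =>
    intro g col0
    rw [List.range_succ_eq_map]
    simp only [List.map_cons, List.map_map, List.flatMap_cons, List.flatMap_map]
    rw [pvColsFlat,
      show List.map (g ∘ Nat.succ) (List.range m) = List.map (fun j => g (j + 1)) (List.range m)
        from rfl,
      ih (fun j => g (j + 1)) (col0 + 1)]
    simp only [Nat.cast_zero, add_zero]
    congr 1
    congr 1
    funext j
    have h1 : col0 + 1 + (j : Int) = col0 + ((Nat.succ j : Nat) : Int) := by push_cast; ring
    rw [h1]

theorem pvInnerA (c : Char) (cypher : List String) :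
    ∀ (cols : List Int) (acc : List (Int × Int)),
      cols.foldl (fun acc2 col =>
        let line : List Char := cypher.map (fun s => (PySem.Str.pyGet? s col).getD ' ')
        if c ∈ line then acc2 ++ [(col, ((PySem.List.index? line c).getD 0 : Int))] else acc2) acc
      = acc ++ cols.flatMap (fun col =>
          pvContrib c col (cypher.map (fun s => (PySem.Str.pyGet? s col).getD ' '))) := by
  intro cols
  induction cols with
  | nil => intro acc; simp
  | cons col rest ih =>
    intro acc
    rw [List.foldl_cons, List.flatMap_cons]
    simp only []
    by_cases hm : c ∈ cypher.map (fun s => (PySem.Str.pyGet? s col).getD ' ')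
    · rw [if_pos hm, ih, ← List.append_assoc]
      congr 2
      unfold pvContrib
      rw [if_pos hm]
    · rw [if_neg hm, ih]
      congr 1
      unfold pvContrib
      rw [if_neg hm]
      simp

-- under Pre_, the minimum row length is row 0's length
theorem pvMinLen (cypher : List String) (hne : cypher ≠ [])
    (hb : ∀ s ∈ cypher, (cypher.headD "").toList.length ≤ s.toList.length) :
    ((cypher.map (fun s => s.toList.length)).min?).getD 0 = (cypher.headD "").toList.length := by
  have h1 : (cypher.map (fun s => s.toList.length)).min?
      = some (cypher.headD "").toList.length := by
    rw [List.min?_eq_some_iff]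
    constructor
    · rcases cypher with _ | ⟨s, rest⟩
      · exact absurd rfl hne
      · simp
    · intro b hbmem
      rcases List.mem_map.mp hbmem with ⟨s, hsmem, rfl⟩
      exact hb s hsmem
  rw [h1]; rfl

theorem pvPerChar (c : Char) (cypher : List String) (hne : cypher ≠ [])
    (hb : ∀ s ∈ cypher, (cypher.headD "").toList.length ≤ s.toList.length) :
    (PySem.List.pyRange 0 (PySem.Str.len (cypher.headD "")) 1).flatMap (fun col =>
        pvContrib c col (cypher.map (fun s => (PySem.Str.pyGet? s col).getD ' ')))
      = pvColsFlat c 0 (pvZipStar cypher) := by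
  rw [PySem.Str.len_eq]
  rw [show PySem.List.pyRange 0 ((cypher.headD "").toList.length : Int) 1
      = PySem.List.pyRange 0 ((cypher.headD "").toList.length : Int) from rfl]
  rw [PySem.List.pyRange_zero_natCast, pvZipStar, pvMinLen cypher hne hb,
    pvColsFlat_map_range, List.flatMap_map]
  congr 1
  funext j
  rw [zero_add]
  congr 1
  apply List.map_congr_left
  intro s _
  rw [PySem.Str.pyGet?_natCast, List.getD_eq_getElem?_getD]

theorem pvGramFold (cypher : List String)
    (index : PySem.Dict Char (List (Int × Int)))
    (h : ∀ c : Char,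
      (PySem.List.pyRange 0 (PySem.Str.len (cypher.headD "")) 1).flatMap (fun col =>
        pvContrib c col (cypher.map (fun s => (PySem.Str.pyGet? s col).getD ' ')))
      = index.getD c []) :
    ∀ (l : List Char) (acc : List (Int × Int)),
      l.foldl (fun acc c =>
        (PySem.List.pyRange 0 (PySem.Str.len (cypher.headD "")) 1).foldl (fun acc2 col =>
          let line : List Char := cypher.map (fun s => (PySem.Str.pyGet? s col).getD ' ')
          if c ∈ line then acc2 ++ [(col, ((PySem.List.index? line c).getD 0 : Int))] else acc2) acc) acc
      = l.foldl (fun acc c => acc ++ index.getD c []) acc := by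
  intro l
  induction l with
  | nil => intro acc; rfl
  | cons c rest ih =>
    intro acc
    rw [List.foldl_cons, List.foldl_cons, pvInnerA, h c]
    exact ih _

-- ===== VERDICT (by name: the statement is the Claim_ definition above) =====
-- A's inline match equals B's pvAnswer on every results list
theorem pvMatch_eq_answer (cypher : List String) (results : List (Int × Int)) :
    (match results with
      | [(col1, row1), (col2, row2)] =>
          String.ofList [(PySem.Str.pyGet? ((PySem.List.pyGet? cypher row1).getD "") col2).getD ' ',
                         (PySem.Str.pyGet? ((PySem.List.pyGet? cypher row2).getD "") col1).getD ' ']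
      | _ => "")
      = pvAnswer cypher results := by
  rcases results with _ | ⟨⟨a, b⟩, _ | ⟨⟨e, f⟩, _ | ⟨⟨u, v⟩, t⟩⟩⟩
  · rfl
  · rfl
  · rfl
  · show "" = pvAnswer cypher _
    unfold pvAnswer
    rw [if_neg (by simp)]

theorem in_dia_py_spec : Claim_equal_in_dia_py := by
  intro gram cypher _ hpre
  unfold Spec_in_dia_py
  rcases hpre with h | ⟨hne, hb⟩
  · subst h; rfl
  · unfold in_dia_py in_dia_py_alt
    have hidx : ∀ c : Char,
        (PySem.List.pyRange 0 (PySem.Str.len (cypher.headD "")) 1).flatMap (fun col =>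
          pvContrib c col (cypher.map (fun s => (PySem.Str.pyGet? s col).getD ' ')))
        = (((pvZipStar cypher).foldl
            (fun (st : PySem.Dict Char (List (Int × Int)) × Int) column =>
              (pvScanCol st.2 column 0 PySem.Set.empty st.1, st.2 + 1))
            (PySem.Dict.empty, 0)).1).getD c [] := by
      intro c
      rw [pvPerChar c cypher hne hb, pvFold_getD c (pvZipStar cypher) PySem.Dict.empty 0]
      simp [pysem]
    rw [pvGramFold cypher (((pvZipStar cypher).foldl
        (fun (st : PySem.Dict Char (List (Int × Int)) × Int) column =>
          (pvScanCol st.2 column 0 PySem.Set.empty st.1, st.2 + 1))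
        (PySem.Dict.empty, 0)).1) hidx]
    exact pvMatch_eq_answer cypher _
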